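-- pv_equiv track=rewrite | github.com/airbus/discrete-optimization | src/discrete_optimization/generic_tasks_tools/renewable_resource.py | merge_resources_calendars
-- ===== SOURCE A (Python) =====
-- def merge_resources_calendars(calendars: list[list[int]], horizon: int) -> list[int]:
--     """Merge several resources calendars, considering all resources as one meta-resource
--
--     Args:
--         calendars: calendars for each resource to merge
--         horizon: maximum time step considered
--
--     Returns:
--         calendar for the meta-resource
--     """
--     if len(calendars) == 0:
--         return [0] * horizon
--     else:
--         return [
--             sum(values)
--             for values in zip(
--                 *(
--                     consolidate_calendar(calendar, horizon=horizon)
--                     for calendar in calendars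
--                 )
--             )
--         ]
--
-- def consolidate_calendar(calendar: list[int], horizon: int):
--     """Consoidate the calendar to correspond to the given horizon
--
--
--     If too long, retursn calendar[:horizon].
--     If too short, fill with 0's.
--
--     Args:
--         calendar:
--         horizon:
--
--     Returns:
--         a calendar of size `horizon`
--
--     """
--     return calendar[:horizon] + [0] * (horizon - len(calendar))
-- ===== SOURCE B (Python) =====
-- def merge_resources_calendars(calendars: list[list[int]], horizon: int) -> list[int]:
--     """Merge several resources calendars by row-wise accumulation into a running total."""
--     result = [0] * horizon
--     for calendar in calendars:
--         for t in range(min(len(calendar), horizon)):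
--             result[t] += calendar[t]
--     return result
-- ===== Notes on version B (the rewrite author's own statement) =====
-- stated objective: simpler
-- what changed: Replaces the consolidate-then-zip-transpose column-wise summation with a single running accumulator updated row by row, with no intermediate padded calendars.
-- intended difference: For negative horizon with nonempty calendars all strictly longer than |horizon|, A returns a nonempty list of partial sums caused by the negative-slice artefact of calendar[:horizon], while B returns the empty list, which is the intended calendar of a non-positive horizon. — e.g. on merge_resources_calendars([[1, 2]], -1): A returns [1], B returns []
import Mathlib
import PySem

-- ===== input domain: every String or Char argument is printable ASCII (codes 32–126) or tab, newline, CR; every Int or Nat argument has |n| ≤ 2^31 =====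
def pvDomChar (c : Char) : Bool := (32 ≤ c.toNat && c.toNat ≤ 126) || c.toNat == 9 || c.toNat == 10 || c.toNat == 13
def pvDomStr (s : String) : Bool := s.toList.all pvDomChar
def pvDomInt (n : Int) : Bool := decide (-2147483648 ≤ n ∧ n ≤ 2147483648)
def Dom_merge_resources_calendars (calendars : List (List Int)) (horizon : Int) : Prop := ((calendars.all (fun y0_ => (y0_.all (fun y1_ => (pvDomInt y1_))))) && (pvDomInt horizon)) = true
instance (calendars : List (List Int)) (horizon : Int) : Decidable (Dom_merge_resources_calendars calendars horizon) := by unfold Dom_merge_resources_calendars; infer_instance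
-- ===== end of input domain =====

-- B replaces A's consolidate-then-zip-transpose column-wise summation by a single running
-- accumulator updated row by row (simpler: no intermediate padded calendars).

-- ===== PORT A =====
def consolidate_calendar (calendar : List Int) (horizon : Int) : List Int :=
  PySem.List.slice calendar none (some horizon)
    ++ List.replicate (horizon - (calendar.length : Int)).toNat 0

def merge_resources_calendars (calendars : List (List Int)) (horizon : Int) : List Int :=
  if calendars.length = 0 then List.replicate horizon.toNat 0
  else
    -- zip(*(consolidate_calendar c for c in calendars)) : rows up to the shortest iterable,
    -- row t holding the t-th element of each; sum(values) per row.
    let cons := calendars.map (fun c => consolidate_calendar c horizon)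
    let n := ((cons.map (fun l => l.length)).min?).getD 0
    (List.range n).map (fun t => (cons.map (fun l => l.getD t 0)).sum)

-- ===== PORT B =====
def merge_resources_calendars_alt (calendars : List (List Int)) (horizon : Int) : List Int :=
  calendars.foldl
    (fun result calendar =>
      (PySem.List.pyRange 0 (min (calendar.length : Int) horizon)).foldl
        (fun r t => r.set t.toNat (r.getD t.toNat 0 + calendar.getD t.toNat 0)) result)
    (List.replicate horizon.toNat 0)

-- ===== PRECONDITION & SPEC =====
-- For negative horizon with nonempty calendars all strictly longer than |horizon|, A returns a
-- nonempty list of partial sums caused by the negative-slice artefact of calendar[:horizon],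
-- while B returns the empty list, the intended calendar of a non-positive horizon.
def D_merge_resources_calendars (calendars : List (List Int)) (horizon : Int) : Prop :=
  horizon < 0 ∧ calendars ≠ [] ∧ ∀ c ∈ calendars, 0 < (c.length : Int) + horizon
instance (calendars : List (List Int)) (horizon : Int) : Decidable (D_merge_resources_calendars calendars horizon) := by unfold D_merge_resources_calendars; infer_instance

def Spec_merge_resources_calendars (calendars : List (List Int)) (horizon : Int) (out : List Int) : Prop := ¬ D_merge_resources_calendars calendars horizon → out = merge_resources_calendars_alt calendars horizon
instance (calendars : List (List Int)) (horizon : Int) (out : List Int) : Decidable (Spec_merge_resources_calendars calendars horizon out) := by unfold Spec_merge_resources_calendars; infer_instance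

def pvDiffWitness_merge_resources_calendars : List (List Int) × Int := ([[1, 2]], -1)
def pvDiffWitnessOut_merge_resources_calendars : (List Int) × (List Int) := ([1], [])

-- ===== CLAIM (what is proved, stated in full; the proofs are below) =====
def Claim_unchanged_merge_resources_calendars : Prop := ∀ (calendars : List (List Int)) (horizon : Int), Dom_merge_resources_calendars calendars horizon → Spec_merge_resources_calendars calendars horizon (merge_resources_calendars calendars horizon)
def Claim_changed_merge_resources_calendars : Prop := Dom_merge_resources_calendars (pvDiffWitness_merge_resources_calendars.1) (pvDiffWitness_merge_resources_calendars.2) ∧ D_merge_resources_calendars (pvDiffWitness_merge_resources_calendars.1) (pvDiffWitness_merge_resources_calendars.2) ∧ merge_resources_calendars (pvDiffWitness_merge_resources_calendars.1) (pvDiffWitness_merge_resources_calendars.2) = pvDiffWitnessOut_merge_resources_calendars.1 ∧ merge_resources_calendars_alt (pvDiffWitness_merge_resources_calendars.1) (pvDiffWitness_merge_resources_calendars.2) = pvDiffWitnessOut_merge_resources_calendars.2 ∧ pvDiffWitnessOut_merge_resources_calendars.1 ≠ pvDiffWitnessOut_merge_resources_calendars.2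
def Claim_exact_merge_resources_calendars : Prop := ∀ (calendars : List (List Int)) (horizon : Int), Dom_merge_resources_calendars calendars horizon → D_merge_resources_calendars calendars horizon → merge_resources_calendars calendars horizon ≠ merge_resources_calendars_alt calendars horizon

-- ===== LEMMAS AND PROOFS =====

-- a list is the range-map of any function agreeing with its getD
theorem map_range_eq_self (l : List Int) (f : Nat → Int)
    (hf : ∀ i, i < l.length → f i = l.getD i 0) : (List.range l.length).map f = l := by
  apply List.ext_getElem
  · simp
  · intro i h1 h2
    simp only [List.length_map, List.length_range] at h1
    rw [List.getElem_map, List.getElem_range, hf i h1]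
    simp [List.getD_eq_getElem?_getD, List.getElem?_eq_getElem h2]

-- the Nat-indexed inner loop, unfolded to a pointwise description
theorem foldNat_set (c : List Int) : ∀ (m : Nat) (r : List Int), m ≤ r.length →
    (List.range m).foldl (fun r k => r.set k (r.getD k 0 + c.getD k 0)) r
      = (List.range r.length).map (fun t => if t < m then r.getD t 0 + c.getD t 0 else r.getD t 0) := by
  intro m
  induction m with
  | zero =>
      intro r _
      rw [List.range_zero, List.foldl_nil]
      symm
      apply map_range_eq_self
      intro i hi
      simp
  | succ m ih =>
      intro r hm
      rw [List.range_succ, List.foldl_append, ih r (by omega), List.foldl_cons, List.foldl_nil]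
      apply List.ext_getElem
      · simp
      · intro i h1 h2
        simp only [List.length_map, List.length_range] at h2
        rw [List.getElem_set]
        by_cases him : m = i
        · subst him
          rw [if_pos rfl, List.getElem_map, List.getElem_range,
            PySem.List.getD_map_range _ _ _ _ (by omega)]
          simp
        · rw [if_neg him, List.getElem_map, List.getElem_map]
          have hiff : (i < m) ↔ (i < m + 1) := by omega
          simp [hiff]

-- the inner loop of B, for nonnegative horizon, on an accumulator of full length
theorem inner_full (c r : List Int) (h : Int) (hh : 0 ≤ h) (hr : r.length = h.toNat) :
    (PySem.List.pyRange 0 (min ((c.length : Int)) h)).foldl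
        (fun r t => r.set t.toNat (r.getD t.toNat 0 + c.getD t.toNat 0)) r
      = (List.range h.toNat).map (fun t => r.getD t 0 + c.getD t 0) := by
  have hmin : min ((c.length : Int)) h = ((min c.length h.toNat : Nat) : Int) := by
    push_cast; omega
  rw [hmin, PySem.List.pyRange_zero_natCast, List.foldl_map]
  simp only [Int.toNat_natCast]
  rw [foldNat_set c _ r (by omega)]
  rw [hr]
  apply List.map_congr_left
  intro t ht
  rw [List.mem_range] at ht
  by_cases h1 : t < min c.length h.toNat
  · simp [h1]
  · have hcl : c.length ≤ t := by omega
    simp [h1, List.getD_eq_getElem?_getD, List.getElem?_eq_none hcl]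

-- the outer loop of B, for nonnegative horizon
theorem outer_full (h : Int) (hh : 0 ≤ h) : ∀ (cs : List (List Int)) (r : List Int), r.length = h.toNat →
    cs.foldl (fun result calendar =>
        (PySem.List.pyRange 0 (min ((calendar.length : Int)) h)).foldl
          (fun r t => r.set t.toNat (r.getD t.toNat 0 + calendar.getD t.toNat 0)) result) r
      = (List.range h.toNat).map (fun t => r.getD t 0 + (cs.map (fun c => c.getD t 0)).sum) := by
  intro cs
  induction cs with
  | nil =>
      intro r hr
      rw [List.foldl_nil, ← hr]
      symm
      apply map_range_eq_self
      intro i hi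
      simp
  | cons c cs ih =>
      intro r hr
      rw [List.foldl_cons, inner_full c r h hh hr, ih _ (by simp)]
      apply List.map_congr_left
      intro t ht
      rw [List.mem_range] at ht
      rw [PySem.List.getD_map_range _ _ _ _ ht]
      simp [add_assoc]

-- the consolidated calendar, for nonnegative horizon, is the range-map of getD
theorem consolidate_eq (c : List Int) (h : Int) (hh : 0 ≤ h) :
    consolidate_calendar c h = (List.range h.toNat).map (fun t => c.getD t 0) := by
  unfold consolidate_calendar
  rw [PySem.List.slice_to c hh]
  apply List.ext_getElem
  · simp; omega
  · intro i h1 h2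
    simp only [List.length_append, List.length_take, List.length_replicate] at h1
    simp only [List.length_map, List.length_range] at h2
    rw [List.getElem_map, List.getElem_range]
    by_cases hi : i < c.length
    · rw [List.getElem_append_left (by simp; omega), List.getElem_take]
      simp [List.getD_eq_getElem?_getD, List.getElem?_eq_getElem hi]
    · rw [List.getElem_append_right (by simp; omega)]
      simp [List.getD_eq_getElem?_getD, List.getElem?_eq_none (by omega : c.length ≤ i)]

-- min? of a nonempty constant list
theorem min?_const (l : List Nat) (n : Nat) (hne : l ≠ []) (hall : ∀ x ∈ l, x = n) :
    l.min? = some n := by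
  rw [List.min?_eq_some_iff]
  constructor
  · cases l with
    | nil => exact absurd rfl hne
    | cons a l => have := hall a (by simp); simp [← this]
  · intro b hb; rw [hall b hb]

-- B for nonnegative horizon
theorem alt_nonneg (cs : List (List Int)) (h : Int) (hh : 0 ≤ h) :
    merge_resources_calendars_alt cs h
      = (List.range h.toNat).map (fun t => (cs.map (fun c => c.getD t 0)).sum) := by
  unfold merge_resources_calendars_alt
  rw [outer_full h hh cs _ (by simp)]
  apply List.map_congr_left
  intro t ht
  rw [List.mem_range] at ht
  simp [List.getD_eq_getElem?_getD, ht]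

-- B for negative horizon is []
theorem pyRange_zero_nonpos (b : Int) (hb : b ≤ 0) : PySem.List.pyRange 0 b = [] := by
  simp only [PySem.List.pyRange]
  norm_num
  intro h; omega

theorem alt_neg (cs : List (List Int)) (h : Int) (hh : h < 0) :
    merge_resources_calendars_alt cs h = [] := by
  unfold merge_resources_calendars_alt
  have h0 : h.toNat = 0 := by omega
  rw [h0]
  simp only [List.replicate_zero]
  induction cs with
  | nil => rfl
  | cons c cs ih =>
      rw [List.foldl_cons, pyRange_zero_nonpos _ (by omega : min ((c.length : Int)) h ≤ 0)]
      exact ih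

-- for negative horizon a short calendar consolidates to []
theorem consolidate_neg_short (c : List Int) (h : Int) (hh : h < 0)
    (hc : (c.length : Int) + h ≤ 0) : consolidate_calendar c h = [] := by
  unfold consolidate_calendar
  obtain ⟨k, rfl⟩ : ∃ k : Nat, h = -(k : Int) := ⟨(-h).toNat, by omega⟩
  rw [PySem.List.slice_to_neg_natCast c k (by omega)]
  have h1 : c.length - k = 0 := by omega
  have h2 : (-(k : Int) - (c.length : Int)).toNat = 0 := by omega
  rw [h1, h2]
  simp

theorem a_neg_empty (cs : List (List Int)) (h : Int) (hh : h < 0) (hne : cs ≠ [])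
    (hex : ∃ c ∈ cs, (c.length : Int) + h ≤ 0) :
    merge_resources_calendars cs h = [] := by
  unfold merge_resources_calendars
  rw [if_neg (by simpa using hne)]
  simp only [List.map_map, Function.comp_def]
  obtain ⟨c, hc, hcs⟩ := hex
  have h0 : (0 : Nat) ∈ cs.map (fun c => (consolidate_calendar c h).length) := by
    simp only [List.mem_map]
    exact ⟨c, hc, by rw [consolidate_neg_short c h hh hcs]; rfl⟩
  cases hmin : (cs.map (fun c => (consolidate_calendar c h).length)).min? with
  | none =>
      rw [List.min?_eq_none_iff] at hmin
      rw [hmin] at h0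
      simp at h0
  | some m =>
      have hm0 : m = 0 := Nat.le_zero.mp ((List.min?_eq_some_iff.mp hmin).2 0 h0)
      simp [hm0]

-- ===== VERDICT (by name: the statement is the Claim_ definition above) =====
theorem merge_resources_calendars_spec : Claim_unchanged_merge_resources_calendars := by
  intro cs h _ hnD
  by_cases hcs : cs = []
  · subst hcs
    unfold merge_resources_calendars merge_resources_calendars_alt
    simp
  · rcases lt_or_ge h 0 with hh | hh
    · have hex : ∃ c ∈ cs, (c.length : Int) + h ≤ 0 := by
        by_contra hall
        refine hnD ⟨hh, hcs, fun c hc => ?_⟩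
        by_contra hpos
        exact hall ⟨c, hc, by omega⟩
      rw [a_neg_empty cs h hh hcs hex, alt_neg cs h hh]
    · rw [alt_nonneg cs h hh]
      unfold merge_resources_calendars
      rw [if_neg (by simpa using hcs)]
      simp only [List.map_map, Function.comp_def]
      have hconst : ∀ x ∈ cs.map (fun c => (consolidate_calendar c h).length), x = h.toNat := by
        intro x hx
        simp only [List.mem_map] at hx
        obtain ⟨c, hc, rfl⟩ := hx
        rw [consolidate_eq c h hh]; simp
      rw [min?_const _ h.toNat (by simpa using hcs) hconst, Option.getD_some]
      apply List.map_congr_left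
      intro t ht
      rw [List.mem_range] at ht
      congr 1
      apply List.map_congr_left
      intro c hc
      rw [consolidate_eq c h hh, PySem.List.getD_map_range _ _ _ _ ht]

theorem merge_resources_calendars_changed : Claim_changed_merge_resources_calendars := by
  unfold Claim_changed_merge_resources_calendars; decide

theorem merge_resources_calendars_tight : Claim_exact_merge_resources_calendars := by
  intro cs h _ hD
  obtain ⟨hh, hne, hall⟩ := hD
  rw [alt_neg cs h hh]
  unfold merge_resources_calendars
  rw [if_neg (by simpa using hne)]
  simp only [List.map_map, Function.comp_def]
  have hlenpos : ∀ x ∈ cs.map (fun c => (consolidate_calendar c h).length), 0 < x := by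
    intro x hx
    simp only [List.mem_map] at hx
    obtain ⟨c, hc, rfl⟩ := hx
    have hcpos := hall c hc
    unfold consolidate_calendar
    obtain ⟨k, hk⟩ : ∃ k : Nat, h = -(k : Int) := ⟨(-h).toNat, by omega⟩
    rw [hk, PySem.List.slice_to_neg_natCast c k (by omega)]
    simp
    omega
  cases hmin : (cs.map (fun c => (consolidate_calendar c h).length)).min? with
  | none =>
      rw [List.min?_eq_none_iff, List.map_eq_nil_iff] at hmin
      exact absurd hmin hne
  | some m =>
      have hm := (List.min?_eq_some_iff.mp hmin).1
      have hmpos := hlenpos m hm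
      rw [Option.getD_some]
      intro hEq
      have hl := congrArg List.length hEq
      simp at hl
      omega
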